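-- pv_equiv track=rewrite | github.com/BeTKH/Algorithms | Algo_/arrays/slidingWindow/array_sw2_longestOne.py | longestSubstringOne
-- ===== SOURCE A (Python) =====
-- def longestSubstringOne(s):
--
--     s = list(s)
--
--     l = 0
--     lenList = []
--
--     for r in range(len(s)):
--
--         # current substring
--         currSub = s[l:r+1]
--
--         # no of zeros in current sibstring
--         countZ = currSub.count('0')
--
--         if countZ <= 1:
--
--             lenList.append(len(currSub))
--
--         elif countZ > 1:
--             l += 1
--
--     return max(lenList)
-- ===== SOURCE B (Python) =====
-- def longestSubstringOne(s):
--     best = 0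
--     zeros = 0
--     l = 0
--     for r in range(len(s)):
--         if s[r] == '0':
--             zeros += 1
--         if zeros <= 1:
--             if r - l + 1 > best:
--                 best = r - l + 1
--         else:
--             if s[l] == '0':
--                 zeros -= 1
--             l += 1
--     return best
-- ===== Notes on version B (the rewrite author's own statement) =====
-- stated objective: faster
-- what changed: Replaced the per-step slice + full recount of zeros and the list of all window lengths by a single pass that maintains the zero count incrementally and a running maximum, turning the O(n^2) scan into O(n).
import Mathlib
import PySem

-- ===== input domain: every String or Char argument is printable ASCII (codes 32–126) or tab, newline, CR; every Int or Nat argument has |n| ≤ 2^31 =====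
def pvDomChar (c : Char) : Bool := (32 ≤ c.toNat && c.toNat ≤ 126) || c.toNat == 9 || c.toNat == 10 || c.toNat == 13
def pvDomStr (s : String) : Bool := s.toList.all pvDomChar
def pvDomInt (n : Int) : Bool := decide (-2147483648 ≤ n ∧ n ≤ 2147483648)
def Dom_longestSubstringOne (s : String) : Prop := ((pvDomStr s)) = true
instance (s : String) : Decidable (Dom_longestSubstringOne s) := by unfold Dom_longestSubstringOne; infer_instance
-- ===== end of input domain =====

-- B replaces A's per-step slice-and-recount (O(n^2)) by a single pass with an incremental
-- zero count and a running maximum (O(n)); same window movement, same result.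


-- ===== PORT A =====
-- one loop iteration of A: slice out the current window, count its zeros
def pvStepA (cs : List Char) (st : Int × List Int) (r : Int) : Int × List Int :=
  let currSub := PySem.List.slice cs (some st.1) (some (r + 1))
  let countZ := PySem.List.count currSub '0'
  if countZ ≤ 1 then (st.1, st.2 ++ [(currSub.length : Int)])
  else (st.1 + 1, st.2)

def longestSubstringOne (s : String) : Int :=
  let cs := s.toList
  let st := (PySem.List.pyRange 0 (cs.length : Int)).foldl (pvStepA cs) (0, [])
  -- Python's max(lenList) raises on []; Pre_ excludes that input (s ≠ "")
  (PySem.List.max? st.2 (fun x => x)).getD 0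

-- ===== PORT B =====
-- one loop iteration of B: state (best, zeros, l), incremental zero count
def pvStepB (cs : List Char) (st : Int × Int × Int) (r : Int) : Int × Int × Int :=
  match st with
  | (best, zeros, l) =>
    let zeros := if PySem.List.pyGetD cs r ' ' = '0' then zeros + 1 else zeros
    if zeros ≤ 1 then
      (if r - l + 1 > best then r - l + 1 else best, zeros, l)
    else
      (best, if PySem.List.pyGetD cs l ' ' = '0' then zeros - 1 else zeros, l + 1)

def longestSubstringOne_alt (s : String) : Int :=
  let cs := s.toList
  ((PySem.List.pyRange 0 (cs.length : Int)).foldl (pvStepB cs) (0, 0, 0)).1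

-- ===== PRECONDITION & SPEC =====
-- Pre_ excludes only the empty string, on which Python A raises ValueError (max of an empty list); B returns 0 there
def Pre_longestSubstringOne (s : String) : Prop := s ≠ ""
instance (s : String) : Decidable (Pre_longestSubstringOne s) := by unfold Pre_longestSubstringOne; infer_instance
def pvWitness_longestSubstringOne : String := "10011"

def Spec_longestSubstringOne (s : String) (out : Int) : Prop := out = longestSubstringOne_alt s
instance (s : String) (out : Int) : Decidable (Spec_longestSubstringOne s out) := by unfold Spec_longestSubstringOne; infer_instance

-- ===== CLAIM (what is proved, stated in full; the proofs are below) =====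
def Claim_equal_longestSubstringOne : Prop := ∀ (s : String), Dom_longestSubstringOne s → Pre_longestSubstringOne s → Spec_longestSubstringOne s (longestSubstringOne s)

-- ===== LEMMAS AND PROOFS =====

-- number of zeros in the window cs[l:n]
def pvZ (cs : List Char) (l n : Nat) : Int := (((cs.drop l).take (n - l)).count '0' : Int)

lemma count_take_succ (cs : List Char) (l n : Nat) (hl : l ≤ n) (hn : n < cs.length) :
    ((cs.drop l).take (n + 1 - l)).count '0'
      = ((cs.drop l).take (n - l)).count '0' + (if cs.getD n ' ' = '0' then 1 else 0) := by
  have h1 : n + 1 - l = (n - l) + 1 := by omega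
  have h2 : n - l < (cs.drop l).length := by simp; omega
  rw [h1, List.take_add_one]
  have h3 : (cs.drop l)[n - l]? = some cs[n] := by
    rw [List.getElem?_eq_getElem (by simpa using h2)]
    congr 1
    rw [List.getElem_drop]
    congr 1; omega
  rw [h3]
  have h4 : cs.getD n ' ' = cs[n] := List.getD_eq_getElem cs ' ' hn
  simp [List.count_append, List.count_singleton']
  split <;> simp_all

lemma count_drop_succ (cs : List Char) (l n : Nat) (hl : l ≤ n) (hn : n < cs.length) :
    ((cs.drop l).take (n + 1 - l)).count '0'
      = (if cs.getD l ' ' = '0' then 1 else 0) + ((cs.drop (l + 1)).take (n - l)).count '0' := by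
  have hl' : l < cs.length := by omega
  have h0 : cs.drop l = cs[l] :: cs.drop (l + 1) := List.drop_eq_getElem_cons hl'
  have h1 : n + 1 - l = (n - l) + 1 := by omega
  have h4 : cs.getD l ' ' = cs[l] := List.getD_eq_getElem cs ' ' hl'
  rw [h0, h1, List.take_succ_cons, List.count_cons, h4]
  split <;> simp_all [add_comm]

lemma maxD0_append (L : List Int) (v : Int) (hv : 0 < v) :
    ((PySem.List.max? (L ++ [v]) (fun x => x)).getD 0)
      = if v > (PySem.List.max? L (fun x => x)).getD 0 then v
        else (PySem.List.max? L (fun x => x)).getD 0 := by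
  cases L with
  | nil =>
      rw [List.nil_append, PySem.List.max?_id_cons]
      have h0 : PySem.List.max? ([] : List Int) (fun x => x) = none := by
        rw [PySem.List.max?_eq_none_iff]
      rw [h0]
      simp; omega
  | cons x t =>
      rw [List.cons_append, PySem.List.max?_id_cons, PySem.List.max?_id_cons]
      simp [List.foldl_append]
      rcases le_total (List.foldl max x t) v with h | h
      · simp [max_eq_right h]; omega
      · simp [max_eq_left h]; omega

lemma loop_inv (cs : List Char) (n : Nat) (hn : n ≤ cs.length) :
    ∃ (l : Nat) (L : List Int), l ≤ n ∧
      ((List.range n).map (fun k => ((k : Nat) : Int))).foldl (pvStepA cs) (0, []) = ((l : Int), L) ∧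
      ((List.range n).map (fun k => ((k : Nat) : Int))).foldl (pvStepB cs) (0, 0, 0) =
        ((PySem.List.max? L (fun x => x)).getD 0, pvZ cs l n, (l : Int)) := by
  induction n with
  | zero =>
      exact ⟨0, [], le_refl 0, rfl, rfl⟩
  | succ n ih =>
      obtain ⟨l, L, hln, hA, hB⟩ := ih (by omega)
      have hnlt : n < cs.length := by omega
      have hlt : l < cs.length := by omega
      rw [List.range_succ, List.map_append, List.foldl_append, List.foldl_append, hA, hB]
      simp only [List.map_cons, List.map_nil, List.foldl_cons, List.foldl_nil]
      have hslice : PySem.List.slice cs (some (l : Int)) (some ((n : Int) + 1))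
          = (cs.drop l).take (n + 1 - l) := by
        have h : ((n : Int) + 1) = ((n + 1 : Nat) : Int) := by push_cast; ring
        rw [h, PySem.List.slice_natCast]
      have hget_n : PySem.List.pyGetD cs ((n : Nat) : Int) ' ' = cs.getD n ' ' :=
        PySem.List.pyGetD_natCast cs n ' '
      have hget_l : PySem.List.pyGetD cs ((l : Nat) : Int) ' ' = cs.getD l ' ' :=
        PySem.List.pyGetD_natCast cs l ' '
      set z' : Nat := ((cs.drop l).take (n + 1 - l)).count '0' with hz'
      have hzz : (if cs.getD n ' ' = '0' then pvZ cs l n + 1 else pvZ cs l n) = (z' : Int) := by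
        rw [hz', count_take_succ cs l n hln hnlt]
        unfold pvZ
        push_cast
        split <;> simp
      by_cases hc : z' ≤ 1
      · -- valid window: A appends the window length, B bumps the running max
        have hlen : ((PySem.List.slice cs (some (l : Int)) (some ((n : Int) + 1))).length : Int)
            = (n : Int) - (l : Int) + 1 := by
          rw [hslice]; simp; omega
        refine ⟨l, L ++ [(n : Int) - (l : Int) + 1], by omega, ?_, ?_⟩
        · unfold pvStepA
          simp only [PySem.List.count_eq, hslice]
          rw [if_pos (by rw [← hz']; exact hc)]
          rw [← hslice, hlen]
        · unfold pvStepB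
          simp only [hget_n, hget_l, hzz]
          rw [if_pos (by exact_mod_cast hc)]
          rw [maxD0_append L ((n : Int) - (l : Int) + 1) (by omega)]
          refine congrArg₂ _ rfl (congrArg₂ _ ?_ rfl)
          unfold pvZ; rw [hz']
      · -- too many zeros: A advances l, B evicts cs[l] from the count
        refine ⟨l + 1, L, by omega, ?_, ?_⟩
        · unfold pvStepA
          simp only [PySem.List.count_eq, hslice]
          rw [if_neg (by rw [← hz']; exact hc)]
          push_cast; rfl
        · unfold pvStepB
          simp only [hget_n, hget_l, hzz]
          rw [if_neg (by exact_mod_cast hc)]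
          have hshift : (z' : Int) - (if cs.getD l ' ' = '0' then 1 else 0)
              = pvZ cs (l + 1) (n + 1) := by
            rw [hz', count_drop_succ cs l n hln hnlt]
            unfold pvZ
            have h : n + 1 - (l + 1) = n - l := by omega
            rw [h]
            push_cast
            split <;> simp
          refine congrArg₂ _ rfl (congrArg₂ _ ?_ (by push_cast; ring))
          rw [← hshift]
          split <;> simp

theorem pyRange_len_eq_map (m : Nat) :
    PySem.List.pyRange 0 (m : Int) = (List.range m).map (fun k => ((k : Nat) : Int)) := by
  rw [PySem.List.pyRange_one]
  simp

-- ===== VERDICT (by name: the statement is the Claim_ definition above) =====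
theorem longestSubstringOne_spec : Claim_equal_longestSubstringOne := by
  intro s _ _
  unfold Spec_longestSubstringOne longestSubstringOne longestSubstringOne_alt
  obtain ⟨l, L, -, hA, hB⟩ := loop_inv s.toList s.toList.length (le_refl _)
  simp only [pyRange_len_eq_map, hA, hB]
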